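-- pv_equiv track=rewrite | github.com/skytreader/pydagogical | algorithms/max_subseq.py | find_biased_max
-- ===== SOURCE A (Python) =====
-- def find_biased_max(numseq, origin_index, dest_index):
--     """
--     Find the maximum subarray that starts at origin_index
--     and ends towards (but not always exactly on) dest_index.
--
--     Returns a tuple containing the index where the biased
--     maximum subarray _ends_ and the total sum over that
--     array, in that order.
--     """
--     updater = (lambda x: x + 1) if origin_index < dest_index else (lambda x: x - 1)
--
--     i = origin_index
--     limit = updater(dest_index)
--     max_end_index = i - 1 if origin_index < dest_index else i + 1
--     max_sum = float("-inf")
--     run_sum = 0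
--
--     while i != limit:
--         run_sum += numseq[i]
--
--         if run_sum > max_sum:
--             max_sum = run_sum
--             max_end_index = i
--
--         i = updater(i)
--
--     return (max_end_index, max_sum)
-- ===== SOURCE B (Python) =====
-- def find_biased_max(numseq, origin_index, dest_index):
--     """Prefix-sum + argmax reformulation: build the traversal index list,
--     accumulate prefix sums along it, then pick the first maximal prefix sum."""
--     step = 1 if origin_index < dest_index else -1
--     indices = list(range(origin_index, dest_index + step, step))
--     prefix = []
--     s = 0
--     for i in indices:
--         s += numseq[i]
--         prefix.append(s)
--     m = max(prefix)
--     pos = prefix.index(m)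
--     return (indices[pos], m)
-- ===== Notes on version B (the rewrite author's own statement) =====
-- stated objective: alternative
-- what changed: Replaces A's single while-loop that interleaves summing with a strict running-max update by a three-stage decomposition: build the traversal index list, accumulate its prefix sums, then locate the first maximal prefix sum with max/index and map its position back to the original index.
import Mathlib
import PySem

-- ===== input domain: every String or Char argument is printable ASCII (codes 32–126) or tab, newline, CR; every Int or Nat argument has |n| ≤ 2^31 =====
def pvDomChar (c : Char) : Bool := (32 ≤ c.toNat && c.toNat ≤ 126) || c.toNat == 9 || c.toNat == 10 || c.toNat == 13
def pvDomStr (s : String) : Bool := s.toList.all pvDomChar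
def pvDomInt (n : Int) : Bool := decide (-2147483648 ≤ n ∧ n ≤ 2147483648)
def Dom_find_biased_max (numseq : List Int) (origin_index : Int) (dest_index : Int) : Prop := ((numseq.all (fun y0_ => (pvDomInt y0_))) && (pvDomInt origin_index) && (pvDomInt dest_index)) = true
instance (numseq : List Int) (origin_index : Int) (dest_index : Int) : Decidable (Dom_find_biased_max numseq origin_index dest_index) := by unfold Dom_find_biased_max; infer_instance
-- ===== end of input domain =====

-- B replaces A's single running-max while-loop by a prefix-sum list + first-argmax lookup (alternative decomposition, same cost).


-- ===== PORT A =====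
-- A's while-loop over i = origin, origin±1, …, dest with state (max_end_index, max_sum, run_sum);
-- max_sum starts at float("-inf"), modelled as `none` (the loop always runs ≥ 1 time, so `none` is never returned);
-- numseq[i] is pyGetD (default 0): Pre_ guarantees the index is in range wherever A returns.
def find_biased_max (numseq : List Int) (origin_index : Int) (dest_index : Int) : Int × Int :=
  let step : Int := if origin_index < dest_index then 1 else -1
  let limit : Int := dest_index + step
  let mei0 : Int := if origin_index < dest_index then origin_index - 1 else origin_index + 1
  let r := (PySem.List.pyRange origin_index limit step).foldl
      (fun (st : Int × Option Int × Int) i =>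
        let rs := st.2.2 + PySem.List.pyGetD numseq i 0
        match st.2.1 with
        | none => (i, some rs, rs)
        | some m => if m < rs then (i, some rs, rs) else (st.1, some m, rs))
      (mei0, none, 0)
  (r.1, (r.2.1).getD 0)

-- ===== PORT B =====
def find_biased_max_alt (numseq : List Int) (origin_index : Int) (dest_index : Int) : Int × Int :=
  let step : Int := if origin_index < dest_index then 1 else -1
  let indices := PySem.List.pyRange origin_index (dest_index + step) step
  let prefixSums := (indices.foldl
      (fun (acc : List Int × Int) i =>
        let s := acc.2 + PySem.List.pyGetD numseq i 0
        (acc.1 ++ [s], s)) ([], 0)).1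
  match PySem.List.max? prefixSums (fun y => y) with
  | none => (0, 0)   -- unreachable: the index list is never empty
  | some m =>
    match PySem.List.index? prefixSums m with
    | none => (0, 0) -- unreachable: m ∈ prefix
    | some pos => (indices.getD pos 0, m)

-- ===== PRECONDITION & SPEC =====
-- Pre_: every index A's loop touches lies between origin_index and dest_index inclusive, so the loop
-- raises no IndexError iff both endpoints are valid Python indices into numseq.
def Pre_find_biased_max (numseq : List Int) (origin_index : Int) (dest_index : Int) : Prop :=
  PySem.Raise.InRange numseq.length origin_index ∧ PySem.Raise.InRange numseq.length dest_index
instance (numseq : List Int) (origin_index : Int) (dest_index : Int) : Decidable (Pre_find_biased_max numseq origin_index dest_index) := by unfold Pre_find_biased_max; infer_instance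

def pvWitness_find_biased_max : List Int × Int × Int := ([2, -3, 4, -1], 0, 3)

def Spec_find_biased_max (numseq : List Int) (origin_index : Int) (dest_index : Int) (out : Int × Int) : Prop := out = find_biased_max_alt numseq origin_index dest_index
instance (numseq : List Int) (origin_index : Int) (dest_index : Int) (out : Int × Int) : Decidable (Spec_find_biased_max numseq origin_index dest_index out) := by unfold Spec_find_biased_max; infer_instance

-- ===== CLAIM (what is proved, stated in full; the proofs are below) =====
def Claim_equal_find_biased_max : Prop := ∀ (numseq : List Int) (origin_index : Int) (dest_index : Int), Dom_find_biased_max numseq origin_index dest_index → Pre_find_biased_max numseq origin_index dest_index → Spec_find_biased_max numseq origin_index dest_index (find_biased_max numseq origin_index dest_index)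

-- ===== LEMMAS AND PROOFS =====

-- first-argmax scan: carries the best (index, value) so far, strict '<' update
def pvFam : List (Int × Int) → Int → Int → Int × Int
  | [], bi, bv => (bi, bv)
  | (i, p) :: rest, bi, bv => if bv < p then pvFam rest i p else pvFam rest bi bv

-- prefix sums of numseq along an index list, continuing from rs
def pvScan (numseq : List Int) (rs : Int) : List Int → List Int
  | [] => []
  | i :: rest => (rs + PySem.List.pyGetD numseq i 0) :: pvScan numseq (rs + PySem.List.pyGetD numseq i 0) rest

lemma pvScan_length (numseq : List Int) (rs : Int) (is_ : List Int) :
    (pvScan numseq rs is_).length = is_.length := by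
  induction is_ generalizing rs with
  | nil => rfl
  | cons i rest ih => simp [pvScan, ih]

-- A's loop, once max_sum is a real number, is pvFam over (index, prefix-sum) pairs
lemma pvA_loop (numseq : List Int) (is_ : List Int) (mei m rs : Int) :
    (let r := is_.foldl
        (fun (st : Int × Option Int × Int) i =>
          let rs := st.2.2 + PySem.List.pyGetD numseq i 0
          match st.2.1 with
          | none => (i, some rs, rs)
          | some m => if m < rs then (i, some rs, rs) else (st.1, some m, rs))
        (mei, some m, rs);
      ((r.1, (r.2.1).getD 0) : Int × Int)) =
    pvFam (is_.zip (pvScan numseq rs is_)) mei m := by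
  induction is_ generalizing mei m rs with
  | nil => rfl
  | cons i rest ih =>
    simp only [List.foldl_cons, pvScan, List.zip_cons_cons, pvFam]
    by_cases h : m < rs + PySem.List.pyGetD numseq i 0 <;> simp [h, ih]

-- B's prefix builder produces pvScan
lemma pvB_prefix (numseq : List Int) (is_ : List Int) (l : List Int) (rs : Int) :
    (is_.foldl
      (fun (acc : List Int × Int) i =>
        let s := acc.2 + PySem.List.pyGetD numseq i 0
        (acc.1 ++ [s], s)) (l, rs)).1 = l ++ pvScan numseq rs is_ := by
  induction is_ generalizing l rs with
  | nil => simp [pvScan]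
  | cons i rest ih => simp [pvScan, ih]

-- the core correspondence: pvFam = "look up the first position of the maximum"
lemma pvFam_eq (prest : List Int) : ∀ (irest : List Int) (i0 p0 : Int),
    irest.length = prest.length →
    pvFam (irest.zip prest) i0 p0 =
      ((i0 :: irest).getD ((PySem.List.index? (p0 :: prest) (prest.foldl max p0)).getD 0) 0,
       prest.foldl max p0) := by
  induction prest with
  | nil =>
    intro irest i0 p0 hlen
    have h0 : irest = [] := List.eq_nil_of_length_eq_zero hlen
    subst h0
    simp only [List.foldl_nil]
    rw [PySem.List.index?_cons_self]
    rfl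
  | cons p1 rest ih =>
    intro irest i0 p0 hlen
    match irest with
    | [] => simp at hlen
    | i1 :: irest' =>
      have hlen' : irest'.length = rest.length := by simpa using hlen
      simp only [List.zip_cons_cons, pvFam]
      by_cases h : p0 < p1
      · -- new best p1; p0 can never be the max again
        rw [if_pos h, ih irest' i1 p1 hlen']
        have hmax : max p0 p1 = p1 := by omega
        have hle : p1 ≤ rest.foldl max p1 := (PySem.List.le_foldl_max rest p1).1
        simp only [List.foldl_cons, hmax]
        have hmem : rest.foldl max p1 ∈ p1 :: rest :=
          PySem.List.max?_mem (PySem.List.max?_id_cons p1 rest)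
        obtain ⟨k, hk⟩ := Option.isSome_iff_exists.1
          ((PySem.List.index?_isSome_iff _ _).2 hmem)
        rw [PySem.List.index?_cons_of_ne _ (show p0 ≠ rest.foldl max p1 by omega), hk]
        simp
      · -- old best survives
        rw [if_neg h, ih irest' i0 p0 hlen']
        have hmax : max p0 p1 = p0 := by omega
        simp only [List.foldl_cons, hmax]
        by_cases hp0 : p0 = rest.foldl max p0
        · rw [← hp0, PySem.List.index?_cons_self, PySem.List.index?_cons_self]
          rfl
        · have hle : p0 ≤ rest.foldl max p0 := (PySem.List.le_foldl_max rest p0).1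
          have hne2 : rest.foldl max p0 ≠ p1 := by omega
          rw [PySem.List.index?_cons_of_ne _ (show p0 ≠ rest.foldl max p0 by omega),
              PySem.List.index?_cons_of_ne _ (show p0 ≠ rest.foldl max p0 by omega),
              PySem.List.index?_cons_of_ne _ (show p1 ≠ rest.foldl max p0 by omega)]
          cases hidx : PySem.List.index? rest (rest.foldl max p0) <;> simp

-- both ports on a nonempty index list i0 :: irest agree (for either initial mei0)
lemma pvMain (numseq : List Int) (origin_index dest_index : Int)
    (i0 : Int) (irest : List Int)
    (hidx : PySem.List.pyRange origin_index
        (dest_index + (if origin_index < dest_index then 1 else -1))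
        (if origin_index < dest_index then 1 else -1) = i0 :: irest) :
    find_biased_max numseq origin_index dest_index =
      find_biased_max_alt numseq origin_index dest_index := by
  simp only [find_biased_max, find_biased_max_alt, hidx, List.foldl_cons]
  set v0 : Int := 0 + PySem.List.pyGetD numseq i0 0 with hv0
  have hA := pvA_loop numseq irest i0 v0 v0
  simp only at hA
  rw [hA]
  have hB := pvB_prefix numseq irest [v0] v0
  simp only at hB
  simp only [List.nil_append]
  rw [hB]
  simp only [List.singleton_append]
  rw [PySem.List.max?_id_cons]
  have hmem : (pvScan numseq v0 irest).foldl max v0 ∈ v0 :: pvScan numseq v0 irest :=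
    PySem.List.max?_mem (PySem.List.max?_id_cons v0 (pvScan numseq v0 irest))
  obtain ⟨k, hk⟩ := Option.isSome_iff_exists.1
    ((PySem.List.index?_isSome_iff _ _).2 hmem)
  have hfam := pvFam_eq (pvScan numseq v0 irest) irest i0 v0 (by rw [pvScan_length])
  rw [hfam]
  rw [PySem.List.index?_eq_idxOf?] at hk
  simp [hk]

-- ===== VERDICT (by name: the statement is the Claim_ definition above) =====
theorem find_biased_max_spec : Claim_equal_find_biased_max := by
  intro numseq o d _ _
  unfold Spec_find_biased_max
  by_cases h : o < d
  · refine pvMain numseq o d o (PySem.List.pyRange (o + 1) (d + 1) 1) ?_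
    simp only [if_pos h]
    exact PySem.List.pyRange_one_cons (by omega)
  · refine pvMain numseq o d o (PySem.List.pyRange (o - 1) (d + -1) (-1)) ?_
    simp only [if_neg h]
    exact PySem.List.pyRange_neg_one_cons (by omega)
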